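-- pv_equiv track=rewrite | github.com/stanleybak/quantized_nn_backreach | util.py | get_tau_index
-- ===== SOURCE A (Python) =====
-- def get_tau_index(tau):
--     """get the index of the network given the value of tau in seconds"""
--
--     assert isinstance(tau, int)
--
--     tau_list = (0, 1, 5, 10, 20, 50, 60, 80, 100)
--     tau_index = -1
--
--     if tau <= tau_list[0]:
--         tau_index = 0
--     elif tau >= tau_list[-1]:
--         tau_index = len(tau_list) - 1
--     else:
--         # find the index of the closest tau value, rounding down to break ties
--
--         for i, tau_min in enumerate(tau_list[:-1]):
--             tau_max = tau_list[i+1]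
--
--             if tau_min <= tau <= tau_max:
--                 if abs(tau - tau_min) <= abs(tau - tau_max):
--                     tau_index = i
--                 else:
--                     tau_index = i+1
--
--                 break
--
--     assert tau_index >= 0, f"tau_index not found for tau = {tau}?"
--     return tau_index
-- ===== SOURCE B (Python) =====
-- def get_tau_index(tau):
--     """get the index of the network given the value of tau in seconds"""
--
--     assert isinstance(tau, int)
--
--     tau_list = (0, 1, 5, 10, 20, 50, 60, 80, 100)
--
--     # global argmin of the distances; .index returns the FIRST minimum,
--     # which breaks ties toward the lower index exactly as required
--     distances = [abs(tau - t) for t in tau_list]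
--     return distances.index(min(distances))
-- ===== Notes on version B (the rewrite author's own statement) =====
-- stated objective: simpler
-- what changed: Replaces the guard branches plus interval-bracket scan (find the bracketing pair, compare the two endpoint distances) by a global argmin: build the distance list once and return the index of its first minimum, which reproduces the round-down tie rule.
import Mathlib
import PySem

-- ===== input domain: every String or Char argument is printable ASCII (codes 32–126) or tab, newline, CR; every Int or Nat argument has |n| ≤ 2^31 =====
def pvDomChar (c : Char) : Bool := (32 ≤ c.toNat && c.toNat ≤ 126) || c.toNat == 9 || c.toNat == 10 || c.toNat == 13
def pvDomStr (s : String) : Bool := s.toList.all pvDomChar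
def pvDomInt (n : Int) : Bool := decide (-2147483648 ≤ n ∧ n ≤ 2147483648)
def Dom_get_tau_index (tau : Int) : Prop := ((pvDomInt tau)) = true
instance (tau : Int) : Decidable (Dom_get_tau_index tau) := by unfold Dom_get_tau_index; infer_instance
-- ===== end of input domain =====

-- B replaces A's guard branches + interval-bracket scan by a global argmin over the
-- distance list (first minimum = round-down tie rule); objective: simpler.

-- ===== PORT A =====
-- the shared tuple constant `tau_list`
def pvTauList : List Int := [0, 1, 5, 10, 20, 50, 60, 80, 100]

-- the `for i, tau_min in enumerate(tau_list[:-1])` loop with its `break`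
def pvLoopA (tau : Int) : List (Int × Int) → Int
  | [] => -1
  | (i, tauMin) :: rest =>
      -- tau_list[i+1]; in range for every i the loop reaches, so getD's default is never used
      let tauMax := (PySem.List.pyGet? pvTauList (i + 1)).getD 0
      if tauMin ≤ tau ∧ tau ≤ tauMax then
        if |tau - tauMin| ≤ |tau - tauMax| then i else i + 1
      else pvLoopA tau rest

def get_tau_index (tau : Int) : Int :=
  if tau ≤ (PySem.List.pyGet? pvTauList 0).getD 0 then 0
  else if tau ≥ (PySem.List.pyGet? pvTauList (-1)).getD 0 then (pvTauList.length : Int) - 1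
  else pvLoopA tau (PySem.List.enumerate (PySem.List.slice pvTauList none (some (-1))))
  -- the trailing `assert tau_index >= 0` never fires: the branches cover all tau

-- ===== PORT B =====
-- distances.index(min(distances)); the none arms are unreachable (distances is nonempty)
def pvArgmin (distances : List Int) : Int :=
  match PySem.List.min? distances (fun x => x) with
  | none => -1
  | some m =>
      match PySem.List.index? distances m with
      | none => -1
      | some i => (i : Int)

def get_tau_index_alt (tau : Int) : Int :=
  pvArgmin (pvTauList.map (fun t => |tau - t|))

-- ===== PRECONDITION & SPEC =====
def Spec_get_tau_index (tau : Int) (out : Int) : Prop := out = get_tau_index_alt tau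
instance (tau : Int) (out : Int) : Decidable (Spec_get_tau_index tau out) := by unfold Spec_get_tau_index; infer_instance

-- ===== CLAIM (what is proved, stated in full; the proofs are below) =====
def Claim_equal_get_tau_index : Prop := ∀ (tau : Int), Dom_get_tau_index tau → Spec_get_tau_index tau (get_tau_index tau)

-- ===== LEMMAS AND PROOFS =====

theorem pv_alt_le_zero (tau : Int) (h : tau ≤ 0) : get_tau_index_alt tau = 0 := by
  have hd : pvTauList.map (fun t => |tau - t|) =
      (-tau) :: [1 - tau, 5 - tau, 10 - tau, 20 - tau, 50 - tau, 60 - tau, 80 - tau, 100 - tau] := by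
    simp only [pvTauList, List.map, List.cons.injEq, and_true]
    and_intros <;> (rw [abs_of_nonpos (by omega)]; try ring)
  unfold get_tau_index_alt pvArgmin
  rw [hd, PySem.List.min?_id_cons]
  have hm : ([1 - tau, 5 - tau, 10 - tau, 20 - tau, 50 - tau, 60 - tau, 80 - tau, 100 - tau]).foldl min (-tau) = -tau := by
    simp only [List.foldl]; omega
  rw [hm]
  dsimp only
  rw [PySem.List.index?_cons_self]
  rfl

theorem pv_alt_ge_100 (tau : Int) (h : 100 ≤ tau) : get_tau_index_alt tau = 8 := by
  have hd : pvTauList.map (fun t => |tau - t|) =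
      tau :: [tau - 1, tau - 5, tau - 10, tau - 20, tau - 50, tau - 60, tau - 80, tau - 100] := by
    simp only [pvTauList, List.map, List.cons.injEq, and_true]
    and_intros <;> (rw [abs_of_nonneg (by omega)]; try ring)
  unfold get_tau_index_alt pvArgmin
  rw [hd, PySem.List.min?_id_cons]
  have hm : ([tau - 1, tau - 5, tau - 10, tau - 20, tau - 50, tau - 60, tau - 80, tau - 100]).foldl min tau = tau - 100 := by
    simp only [List.foldl]; omega
  rw [hm]
  dsimp only
  rw [PySem.List.index?_cons_of_ne _ (by omega), PySem.List.index?_cons_of_ne _ (by omega),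
      PySem.List.index?_cons_of_ne _ (by omega), PySem.List.index?_cons_of_ne _ (by omega),
      PySem.List.index?_cons_of_ne _ (by omega), PySem.List.index?_cons_of_ne _ (by omega),
      PySem.List.index?_cons_of_ne _ (by omega), PySem.List.index?_cons_of_ne _ (by omega),
      PySem.List.index?_cons_self]
  rfl

-- ===== VERDICT (by name: the statement is the Claim_ definition above) =====
theorem get_tau_index_spec : Claim_equal_get_tau_index := by
  intro tau _
  unfold Spec_get_tau_index
  by_cases h0 : tau ≤ 0
  · rw [pv_alt_le_zero tau h0]
    unfold get_tau_index
    simp [pvTauList, PySem.List.pyGet?, PySem.List.pyIdx?, h0]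
  · by_cases h100 : 100 ≤ tau
    · rw [pv_alt_ge_100 tau h100]
      unfold get_tau_index
      have : ¬ tau ≤ (PySem.List.pyGet? pvTauList 0).getD 0 := by
        simp [pvTauList, PySem.List.pyGet?, PySem.List.pyIdx?]; omega
      rw [if_neg this]
      have h2 : tau ≥ (PySem.List.pyGet? pvTauList (-1)).getD 0 := by
        simp [pvTauList, PySem.List.pyGet?, PySem.List.pyIdx?]; omega
      rw [if_pos h2]; rfl
    · have h1 : 1 ≤ tau := by omega
      have h2 : tau ≤ 99 := by omega
      interval_cases tau <;> decide
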